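-- pv_equiv track=rewrite | github.com/JBRS307/WDI | list1/zad2.py | findBeginningPair
-- ===== SOURCE A (Python) =====
-- def isNumInSeq(a, b, num):
--     while b <= num:
--         a, b = b, a+b
--         if b == num:
--             return True
--     return False
--
-- def findBeginningPair(year):
--     currSum = 1
--     while True:
--         for a in range(currSum):
--             b = currSum-a
--             if isNumInSeq(a, b, year):
--                 return a, b
--         currSum += 1
-- ===== SOURCE B (Python) =====
-- def findBeginningPair(year):
--     # A sequence seeded (a, b) contains `year` at position k+1 (k >= 1) iff
--     # F_k*a + F_{k+1}*b == year.  For each Fibonacci coefficient pair (p, f) =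
--     # (F_k, F_{k+1}) with f <= year, solve the linear Diophantine equation
--     # p*a + f*b = year for the solution with maximal b (minimal (a+b, a)),
--     # using Cassini's identity q*f - p*p*... i.e. F_{k-1}*F_{k+1} - F_k^2 = (-1)^k,
--     # so s*q is the inverse of f modulo p.  Keep the best candidate by (a+b, a),
--     # which is exactly A's search order (sum ascending, then a ascending).
--     best = None
--     q, p, f, s = 0, 1, 1, -1   # F_0, F_1, F_2, (-1)^1
--     while f <= year:
--         if p == 1:
--             b = year // f
--         else:
--             b0 = (year * s * q) % p
--             b = b0 + ((year // f - b0) // p) * p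
--         if b >= 1:
--             a = (year - f * b) // p
--             cand = (a + b, a)
--             if best is None or cand < best:
--                 best = cand
--         q, p, f, s = p, f, p + f, -s
--     ssum, a = best
--     return a, ssum - a
-- ===== Notes on version B (the rewrite author's own statement) =====
-- stated objective: faster
-- what changed: A scans all seed pairs (a,b) in order of increasing sum and simulates the whole Fibonacci-style sequence for each; B instead iterates only over the O(log year) consecutive Fibonacci coefficient pairs (F_k, F_{k+1}), solves the linear Diophantine equation F_k*a + F_{k+1}*b = year for the maximal-b (hence minimal-(a+b,a)) nonnegative solution using a modular inverse obtained from Cassini's identity, and keeps the lexicographically minimal (a+b, a) candidate.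
-- outside the precondition, e.g. on findBeginningPair(0): A does not finish within the time limit, B raises TypeError
import Mathlib
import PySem

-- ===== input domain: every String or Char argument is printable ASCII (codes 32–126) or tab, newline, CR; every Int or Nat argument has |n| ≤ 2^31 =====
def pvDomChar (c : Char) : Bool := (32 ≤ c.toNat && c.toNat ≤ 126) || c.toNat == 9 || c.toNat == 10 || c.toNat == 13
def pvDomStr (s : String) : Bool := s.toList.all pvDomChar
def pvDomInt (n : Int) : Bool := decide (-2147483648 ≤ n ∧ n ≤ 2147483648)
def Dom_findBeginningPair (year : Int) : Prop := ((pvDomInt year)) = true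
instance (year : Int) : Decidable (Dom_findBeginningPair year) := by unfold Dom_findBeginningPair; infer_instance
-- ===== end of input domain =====

-- B replaces A's quadratic scan over seed pairs by solving, for each Fibonacci
-- coefficient pair, a linear Diophantine equation for the minimal-(sum, a) seed
-- (objective: faster, asymptotically).

-- ===== PORT A =====
-- while b <= num: a, b = b, a+b; if b == num: return True
def isNumInSeq (fuel : Nat) (a b num : Int) : Bool :=
  match fuel with
  | 0 => false
  | f + 1 =>
    if b ≤ num then
      if a + b = num then true
      else isNumInSeq f b (a + b) num
    else false
-- fuel num.toNat+2 is sufficient: with a ≥ 0, b ≥ 1 the second component is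
-- nondecreasing and strictly increasing from the second step on.

-- for a in range(currSum): b = currSum - a; if isNumInSeq(a, b, year): return a, b
def findRow (year currSum : Int) : List Int → Option (List Int)
  | [] => none
  | a :: rest =>
      if isNumInSeq (year.toNat + 2) a (currSum - a) year then some [a, currSum - a]
      else findRow year currSum rest

-- while True: <scan row currSum>; currSum += 1
def outerLoop (year : Int) : Nat → Int → List Int
  | 0, _ => []
  | f + 1, currSum =>
      match findRow year currSum (PySem.List.pyRange 0 currSum 1) with
      | some r => r
      | none => outerLoop year f (currSum + 1)

-- Python's `while True` returns by currSum = year for year ≥ 1 (seed (0, year)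
-- works), so fuel year.toNat is exact there; for year ≤ 0 Python diverges
-- (excluded by Pre_).
def findBeginningPair (year : Int) : List Int := outerLoop year year.toNat 1

-- ===== PORT B =====
-- Python tuple comparison cand < best (lexicographic on pairs)
def pairLt (x y : Int × Int) : Bool := x.1 < y.1 || (x.1 == y.1 && x.2 < y.2)

-- loop body of Source B's while-loop (state q,p,f,s = F_{k-1}, F_k, F_{k+1}, (-1)^k)
def bStep (year q p f s : Int) (best : Option (Int × Int)) : Option (Int × Int) :=
  let b :=
    if p = 1 then PySem.Int.floordiv year f
    else
      let b0 := PySem.Int.mod (year * s * q) p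
      b0 + PySem.Int.floordiv (PySem.Int.floordiv year f - b0) p * p
  if 1 ≤ b then
    let a := PySem.Int.floordiv (year - f * b) p
    let cand := (a + b, a)
    match best with
    | none => some cand
    | some bst => if pairLt cand bst then some cand else some bst
  else best

-- while f <= year: <bStep>; q, p, f, s = p, f, p+f, -s
-- fuel year.toNat+2 is sufficient: f = F_{k+1} grows past year within that many steps.
def bLoop (year : Int) : Nat → Int → Int → Int → Int → Option (Int × Int) → Option (Int × Int)
  | 0, _, _, _, _, best => best
  | fuel + 1, q, p, f, s, best =>
      if f ≤ year then bLoop year fuel p f (p + f) (-s) (bStep year q p f s best)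
      else best

def findBeginningPair_alt (year : Int) : List Int :=
  match bLoop year (year.toNat + 2) 0 1 1 (-1) none with
  | some (ssum, a) => [a, ssum - a]
  | none => []   -- unreachable for year ≥ 1; Python raises there (outside Pre_)

-- ===== PRECONDITION & SPEC =====
-- Pre_ excludes year ≤ 0, on which A's `while True` never terminates (no
-- Fibonacci-style sequence with b ≥ 1 ever hits a nonpositive number).
def Pre_findBeginningPair (year : Int) : Prop := 1 ≤ year
instance (year : Int) : Decidable (Pre_findBeginningPair year) := by unfold Pre_findBeginningPair; infer_instance

def pvWitness_findBeginningPair : Int := (7)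

def Spec_findBeginningPair (year : Int) (out : List Int) : Prop := out = findBeginningPair_alt year
instance (year : Int) (out : List Int) : Decidable (Spec_findBeginningPair year out) := by unfold Spec_findBeginningPair; infer_instance

-- ===== CLAIM (what is proved, stated in full; the proofs are below) =====
def Claim_equal_findBeginningPair : Prop := ∀ (year : Int), Dom_findBeginningPair year → Pre_findBeginningPair year → Spec_findBeginningPair year (findBeginningPair year)

-- ===== LEMMAS AND PROOFS =====

-- Fibonacci numbers as integers
def F (n : Nat) : Int := Nat.fib n

theorem F_add_two (n : Nat) : F (n + 2) = F n + F (n + 1) := by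
  simp [F, Nat.fib_add_two]

theorem F_pos (n : Nat) : 1 ≤ F (n + 1) := by
  have h : 1 ≤ Nat.fib (n + 1) := Nat.fib_pos.mpr (Nat.succ_pos n)
  simp only [F]; exact_mod_cast h

theorem F_nonneg (n : Nat) : 0 ≤ F n := by simp [F]

theorem F_mono {m n : Nat} (h : m ≤ n) : F m ≤ F n := by
  simp only [F]; exact_mod_cast Nat.fib_mono h

-- n ≤ fib (n+2)
theorem le_F (n : Nat) : (n : Int) ≤ F (n + 2) := by
  induction n with
  | zero => simp [F]
  | succ m ih =>
      have h1 := F_pos m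
      have h2 : F (m + 3) = F (m + 1) + F (m + 2) := F_add_two (m + 1)
      show ((m + 1 : Nat) : Int) ≤ F (m + 3)
      push_cast
      omega

-- Cassini: F k * F (k+2) - F (k+1)^2 = (-1)^(k+1)
theorem cassini (k : Nat) : F k * F (k + 2) - F (k + 1) ^ 2 = (-1 : Int) ^ (k + 1) := by
  induction k with
  | zero => simp [F]
  | succ m ih =>
      have h1 : F (m + 3) = F (m + 1) + F (m + 2) := F_add_two (m + 1)
      have h2 : F (m + 2) = F m + F (m + 1) := F_add_two m
      have key : F (m + 1) * F (m + 3) - F (m + 2) ^ 2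
           = -(F m * F (m + 2) - F (m + 1) ^ 2) := by
        linear_combination F (m + 1) * h1 - F (m + 2) * h2
      show F (m + 1) * F (m + 3) - F (m + 2) ^ 2 = (-1 : Int) ^ (m + 2)
      rw [key, ih]; ring

-- a solution with sequence index k (the k-th row of A's inner loop algebra)
def SolK (year : Int) (k : Nat) (a b : Int) : Prop :=
  0 ≤ a ∧ 1 ≤ b ∧ F k * a + F (k + 1) * b = year

-- soundness of A's inner loop
theorem F_one : F 1 = 1 := by simp [F]

theorem F_two : F 2 = 1 := by simp [F]

theorem isNumInSeq_sound : ∀ (fuel : Nat) (a b num : Int),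
    isNumInSeq fuel a b num = true → ∃ k, 1 ≤ k ∧ F k * a + F (k + 1) * b = num := by
  intro fuel
  induction fuel with
  | zero => intro a b num h; simp [isNumInSeq] at h
  | succ f ih =>
      intro a b num h
      simp only [isNumInSeq] at h
      by_cases hb : b ≤ num
      · rw [if_pos hb] at h
        by_cases he : a + b = num
        · exact ⟨1, le_refl 1, by rw [F_one, F_two]; linarith⟩
        · rw [if_neg he] at h
          obtain ⟨k, hk1, hke⟩ := ih b (a + b) num h
          refine ⟨k + 1, by omega, ?_⟩
          have h2 : F (k + 2) = F k + F (k + 1) := F_add_two k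
          linear_combination hke + b * h2
      · rw [if_neg hb] at h; exact absurd h (by simp)

-- completeness of A's inner loop (given enough fuel)
theorem isNumInSeq_complete : ∀ (k : Nat), 1 ≤ k → ∀ (fuel : Nat) (a b num : Int),
    k ≤ fuel → 0 ≤ a → 1 ≤ b → F k * a + F (k + 1) * b = num →
    isNumInSeq fuel a b num = true := by
  intro k
  induction k with
  | zero => intro h; omega
  | succ m ih =>
      intro _ fuel a b num hfuel ha hb he
      obtain ⟨f, rfl⟩ : ∃ f, fuel = f + 1 := ⟨fuel - 1, by omega⟩
      have he' : F (m + 1) * a + F (m + 2) * b = num := he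
      have t1 : 0 ≤ F (m + 1) * a := mul_nonneg (F_nonneg _) ha
      have hF2 : 1 ≤ F (m + 2) := F_pos (m + 1)
      have t2 : b ≤ F (m + 2) * b := by
        nlinarith [mul_nonneg (sub_nonneg.2 hF2) (show (0 : Int) ≤ b by omega)]
      have hble : b ≤ num := by linarith
      simp only [isNumInSeq, if_pos hble]
      by_cases heq : a + b = num
      · simp [heq]
      · rw [if_neg heq]
        cases m with
        | zero =>
            exfalso
            rw [F_one, F_two] at he
            exact heq (by linarith)
        | succ n =>
            apply ih (by omega) f b (a + b) num (by omega) (by omega) (by omega)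
            have h2 : F (n + 3) = F (n + 1) + F (n + 2) := F_add_two (n + 1)
            have he'' : F (n + 2) * a + F (n + 3) * b = num := he
            linear_combination he'' - b * h2

-- a witness index is bounded by year + 1
theorem witness_le (year : Int) {k : Nat} {a b : Int} (hk : 1 ≤ k)
    (ha : 0 ≤ a) (hb : 1 ≤ b) (he : F k * a + F (k + 1) * b = year) :
    (k : Int) ≤ year + 1 := by
  obtain ⟨m, rfl⟩ : ∃ m, k = m + 1 := ⟨k - 1, by omega⟩
  have he' : F (m + 1) * a + F (m + 2) * b = year := he
  have h1 := le_F m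
  have t1 : 0 ≤ F (m + 1) * a := mul_nonneg (F_nonneg _) ha
  have hF2 : 1 ≤ F (m + 2) := F_pos (m + 1)
  have t2 : F (m + 2) ≤ F (m + 2) * b := by
    nlinarith [mul_nonneg (le_trans zero_le_one hF2) (sub_nonneg.2 hb)]
  push_cast
  linarith

theorem isNumInSeq_iff (year a b : Int) (hy : 1 ≤ year) (ha : 0 ≤ a) (hb : 1 ≤ b) :
    isNumInSeq (year.toNat + 2) a b year = true ↔ ∃ k, 1 ≤ k ∧ SolK year k a b := by
  constructor
  · intro h
    obtain ⟨k, hk1, hke⟩ := isNumInSeq_sound _ a b year h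
    exact ⟨k, hk1, ha, hb, hke⟩
  · rintro ⟨k, hk1, _, _, hke⟩
    have hbnd := witness_le year hk1 ha hb hke
    have hy' : ((year.toNat : Int)) = year := Int.toNat_of_nonneg (by omega)
    exact isNumInSeq_complete k hk1 (year.toNat + 2) a b year (by omega) ha hb hke

-- findRow skips prefixes with no hit
theorem findRow_append (year c : Int) (l1 l2 : List Int)
    (h : ∀ x ∈ l1, isNumInSeq (year.toNat + 2) x (c - x) year = false) :
    findRow year c (l1 ++ l2) = findRow year c l2 := by
  induction l1 with
  | nil => simp
  | cons x xs ih =>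
      simp only [List.cons_append, findRow]
      rw [h x (by simp), if_neg (by simp)]
      exact ih (fun y hy => h y (by simp [hy]))

theorem findRow_none (year c : Int) (l : List Int)
    (h : ∀ x ∈ l, isNumInSeq (year.toNat + 2) x (c - x) year = false) :
    findRow year c l = none := by
  have := findRow_append year c l [] h
  simpa using this

-- the outer loop returns the minimal-(sum, a) solution
theorem outerLoop_min (year s₀ a₀ : Int) (hy : 1 ≤ year)
    (hsol : 0 ≤ a₀ ∧ 1 ≤ s₀ - a₀ ∧ ∃ j, 1 ≤ j ∧ SolK year j a₀ (s₀ - a₀))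
    (hmin : ∀ j a b, 1 ≤ j → SolK year j a b → s₀ < a + b ∨ (s₀ = a + b ∧ a₀ ≤ a)) :
    ∀ (fuel : Nat) (c : Int), 1 ≤ c → c ≤ s₀ → s₀ < c + fuel →
      outerLoop year fuel c = [a₀, s₀ - a₀] := by
  have hit_false : ∀ (c x : Int), 0 ≤ x → x < c → (c < s₀ ∨ (c = s₀ ∧ x < a₀)) →
      isNumInSeq (year.toNat + 2) x (c - x) year = false := by
    intro c x hx0 hxc hlex
    cases hB : isNumInSeq (year.toNat + 2) x (c - x) year with
    | false => rfl
    | true =>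
        exfalso
        obtain ⟨k, hk, hsk⟩ := (isNumInSeq_iff year x (c - x) hy hx0 (by omega)).1 hB
        have hm := hmin k x (c - x) hk hsk
        omega
  obtain ⟨ha0, hb0, j0, hj0, hsol0⟩ := hsol
  intro fuel
  induction fuel with
  | zero => intro c _ hc2 hc3; exfalso; simp at hc3; omega
  | succ f ih =>
      intro c hc1 hc2 hc3
      simp only [outerLoop]
      by_cases hcs : c = s₀
      · subst hcs
        rw [PySem.List.pyRange_one_append 0 a₀ c (by omega) (by omega)]
        rw [findRow_append year c _ _
          (fun x hx => hit_false c x (by simpa using (PySem.List.mem_pyRange_one.1 hx).1)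
            (by have := (PySem.List.mem_pyRange_one.1 hx).2; omega)
            (Or.inr ⟨rfl, by have := (PySem.List.mem_pyRange_one.1 hx).2; omega⟩))]
        rw [PySem.List.pyRange_one_cons (show a₀ < c by omega)]
        simp only [findRow]
        rw [if_pos ((isNumInSeq_iff year a₀ (c - a₀) hy ha0 (by omega)).2 ⟨j0, hj0, hsol0⟩)]
      · have hlt : c < s₀ := lt_of_le_of_ne hc2 hcs
        rw [findRow_none year c _
          (fun x hx => hit_false c x (by simpa using (PySem.List.mem_pyRange_one.1 hx).1)
            (by have := (PySem.List.mem_pyRange_one.1 hx).2; omega)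
            (Or.inl hlt))]
        apply ih (c + 1) (by omega) (by omega) (by push_cast at hc3 ⊢; omega)

-- invariant for B's loop: best accounts for all indices j < K
def BInv (year : Int) (K : Nat) (best : Option (Int × Int)) : Prop :=
  match best with
  | none => ∀ j a b, 1 ≤ j → j < K → ¬ SolK year j a b
  | some (s₀, a₀) =>
      (0 ≤ a₀ ∧ 1 ≤ s₀ - a₀ ∧ ∃ j, 1 ≤ j ∧ j < K ∧ F j * a₀ + F (j + 1) * (s₀ - a₀) = year)
      ∧ ∀ j a b, 1 ≤ j → j < K → SolK year j a b → s₀ < a + b ∨ (s₀ = a + b ∧ a₀ ≤ a)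

-- global version (all indices)
def BGInv (year : Int) (best : Option (Int × Int)) : Prop :=
  match best with
  | none => ∀ j a b, 1 ≤ j → ¬ SolK year j a b
  | some (s₀, a₀) =>
      (0 ≤ a₀ ∧ 1 ≤ s₀ - a₀ ∧ ∃ j, 1 ≤ j ∧ F j * a₀ + F (j + 1) * (s₀ - a₀) = year)
      ∧ ∀ j a b, 1 ≤ j → SolK year j a b → s₀ < a + b ∨ (s₀ = a + b ∧ a₀ ≤ a)

-- the value b computed by one iteration of Source B's loop, as a closed term
def bbExpr (year q p f s : Int) : Int :=
  if p = 1 then PySem.Int.floordiv year f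
  else
    PySem.Int.mod (year * s * q) p +
      PySem.Int.floordiv (PySem.Int.floordiv year f - PySem.Int.mod (year * s * q) p) p *
        p

def aExpr (year q p f s : Int) : Int :=
  PySem.Int.floordiv (year - f * bbExpr year q p f s) p

-- bStep, re-expressed through the named helpers (definitional)
theorem bStep_eq (year q p f s : Int) (best : Option (Int × Int)) :
    bStep year q p f s best =
      (if 1 ≤ bbExpr year q p f s then
        (match best with
         | none => some (aExpr year q p f s + bbExpr year q p f s, aExpr year q p f s)
         | some bst =>
             if pairLt (aExpr year q p f s + bbExpr year q p f s, aExpr year q p f s) bst then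
               some (aExpr year q p f s + bbExpr year q p f s, aExpr year q p f s)
             else some bst)
      else best) := rfl

-- bbExpr is the largest b with p ∣ year - f*b and f*b ≤ year
theorem bmax_spec (year q p f s : Int) (hp : 1 ≤ p) (hf0 : 1 ≤ f)
    (hcas : q * f - p ^ 2 = s) (hs2 : s * s = 1) :
    (p ∣ year - f * bbExpr year q p f s) ∧ f * bbExpr year q p f s ≤ year ∧
      ∀ b', p ∣ year - f * b' → f * b' ≤ year → b' ≤ bbExpr year q p f s := by
  have hfne : f ≠ 0 := by omega
  have hfpos : (0 : Int) < f := by omega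
  have hppos : (0 : Int) < p := by omega
  by_cases hp1 : p = 1
  · subst hp1
    simp only [bbExpr, if_true, PySem.Int.floordiv_eq_ediv_of_pos hfpos]
    refine ⟨one_dvd _, ?_, ?_⟩
    · have := Int.ediv_mul_le year hfne
      linarith [this]
    · intro b' _ hb'
      rw [Int.le_ediv_iff_mul_le hfpos]
      linarith
  · simp only [bbExpr, if_neg hp1, PySem.Int.floordiv_eq_ediv_of_pos hfpos,
      PySem.Int.floordiv_eq_ediv_of_pos hppos, PySem.Int.mod_eq_emod_of_pos hppos]
    set b0 := (year * s * q) % p with hb0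
    set M := year / f with hM
    set bb := b0 + (M - b0) / p * p with hbb
    have hdvd0 : p ∣ year - f * b0 := by
      have e0 : year * s * q - b0 = p * (year * s * q / p) := by
        have := Int.mul_ediv_add_emod (year * s * q) p
        omega
      have e1 : year - f * (year * s * q) = -(year * s) * p ^ 2 := by
        linear_combination (-(year * s)) * hcas + (-year) * hs2
      have : year - f * b0 = -(year * s) * p ^ 2 + f * (p * (year * s * q / p)) := by
        rw [← e0]; linear_combination e1
      rw [this]
      exact dvd_add ⟨-(year * s) * p, by ring⟩ ⟨f * (year * s * q / p), by ring⟩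
    have hdvdbb : p ∣ year - f * bb := by
      have : year - f * bb = (year - f * b0) - f * ((M - b0) / p) * p := by
        rw [hbb]; ring
      rw [this]
      exact dvd_sub hdvd0 ⟨f * ((M - b0) / p), by ring⟩
    have hbbM : bb ≤ M := by
      have := Int.ediv_mul_le (M - b0) (show p ≠ 0 by omega)
      omega
    refine ⟨hdvdbb, ?_, ?_⟩
    · have : bb * f ≤ year := by
        rw [← Int.le_ediv_iff_mul_le hfpos]; exact hbbM
      linarith
    · intro b' hdvd' hb'le
      have hb'M : b' ≤ M := by
        rw [hM, Int.le_ediv_iff_mul_le hfpos]; linarith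
      have hdvdd : p ∣ b' - b0 := by
        have hf' : p ∣ f * (b' - b0) := by
          have : f * (b' - b0) = (year - f * b0) - (year - f * b') := by ring
          rw [this]; exact dvd_sub hdvd0 hdvd'
        have heq : b' - b0 = s * q * (f * (b' - b0)) - p * (s * p * (b' - b0)) := by
          linear_combination (-(s * (b' - b0))) * hcas + (-(b' - b0)) * hs2
        rw [heq]
        exact dvd_sub (Dvd.dvd.mul_left hf' _) (dvd_mul_right p _)
      obtain ⟨u, hu⟩ := hdvdd
      have hup : u * p = b' - b0 := by linear_combination -hu
      have hule : u ≤ (M - b0) / p := by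
        rw [Int.le_ediv_iff_mul_le hppos]
        omega
      have hmle : p * u ≤ p * ((M - b0) / p) :=
        mul_le_mul_of_nonneg_left hule (show (0:Int) ≤ p by omega)
      have hcomm : (M - b0) / p * p = p * ((M - b0) / p) := mul_comm _ _
      linarith [hu, hmle, hcomm]

-- among the solutions of p*a + f*b = year, larger b means lexicographically
-- smaller (a+b, a)
theorem cand_min (year p f : Int) (hp : 1 ≤ p) (hpf : p ≤ f) {a b a' b' : Int}
    (e1 : p * a + f * b = year) (e2 : p * a' + f * b' = year) (hble : b' ≤ b) :
    a + b < a' + b' ∨ (a + b = a' + b' ∧ a ≤ a') := by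
  rcases eq_or_lt_of_le hble with heq | hlt
  · subst heq
    have : a = a' := by
      have h := mul_left_cancel₀ (show p ≠ 0 by omega) (show p * a = p * a' by linarith)
      exact h
    right; omega
  · have hd : p * (a' - a) = f * (b - b') := by linear_combination e2 - e1
    have hfb : 0 < f * (b - b') := mul_pos (by omega) (by omega)
    have hipos : 0 < a' - a := by
      by_contra hcon
      push_neg at hcon
      have : p * (a' - a) ≤ 0 := mul_nonpos_of_nonneg_of_nonpos (by omega) hcon
      omega
    have hsum : p * (a' + b' - (a + b)) = (f - p) * (b - b') := by linear_combination hd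
    have hsge : a + b ≤ a' + b' := by
      by_contra hcon
      push_neg at hcon
      have hneg : p * (a' + b' - (a + b)) < 0 :=
        mul_neg_of_pos_of_neg (by omega) (by omega)
      have hpos : 0 ≤ (f - p) * (b - b') := mul_nonneg (by omega) (by omega)
      omega
    omega

theorem solK_Fle (year : Int) {j : Nat} {a b : Int} (h : SolK year j a b) :
    F (j + 1) ≤ year := by
  obtain ⟨ha, hb, he⟩ := h
  have t1 : 0 ≤ F j * a := mul_nonneg (F_nonneg _) ha
  have t2 : F (j + 1) ≤ F (j + 1) * b := by
    nlinarith [mul_nonneg (F_nonneg (j + 1)) (show (0:Int) ≤ b - 1 by omega)]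
  linarith

-- once f = F (k+2) exceeds year there are no further solutions
theorem Inv_to_GInv (year : Int) (k : Nat) (best : Option (Int × Int))
    (hinv : BInv year (k + 1) best) (hbig : year < F (k + 2)) : BGInv year best := by
  have hnone : ∀ (j : Nat) (a b : Int), k + 1 ≤ j → ¬ SolK year j a b := by
    intro j a b hj hsol
    have hle := solK_Fle year hsol
    have hmo : F (k + 2) ≤ F (j + 1) := F_mono (by omega)
    omega
  cases best with
  | none =>
      simp only [BGInv]
      simp only [BInv] at hinv
      intro j a b hj
      by_cases hjk : j < k + 1
      · exact hinv j a b hj hjk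
      · exact hnone j a b (by omega)
  | some pr =>
      obtain ⟨s₀, a₀⟩ := pr
      simp only [BGInv]
      simp only [BInv] at hinv
      obtain ⟨⟨ha0, hb0, j, hj1, _, hje⟩, hmin⟩ := hinv
      refine ⟨⟨ha0, hb0, j, hj1, hje⟩, ?_⟩
      intro j a b hj hsol
      by_cases hjk : j < k + 1
      · exact hmin j a b hj hjk hsol
      · exact absurd hsol (hnone j a b (by omega))

-- the step lemma: bStep processes index k+1 exactly
theorem bStep_inv (year : Int) (k : Nat) (best : Option (Int × Int)) (hy : 1 ≤ year)
    (hf : F (k + 2) ≤ year) (hinv : BInv year (k + 1) best) :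
    BInv year (k + 2) (bStep year (F k) (F (k + 1)) (F (k + 2)) ((-1) ^ (k + 1)) best) := by
  have hp : 1 ≤ F (k + 1) := F_pos k
  have hf1 : 1 ≤ F (k + 2) := F_pos (k + 1)
  have hpf : F (k + 1) ≤ F (k + 2) := F_mono (by omega)
  have hcas := cassini k
  have hs2 : ((-1:Int) ^ (k + 1)) * ((-1:Int) ^ (k + 1)) = 1 := by
    rw [← pow_add]
    exact Even.neg_one_pow ⟨k + 1, by ring⟩
  obtain ⟨h1, h2, h3⟩ :=
    bmax_spec year (F k) (F (k + 1)) (F (k + 2)) ((-1) ^ (k + 1)) hp hf1 hcas hs2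
  rw [bStep_eq]
  set bb := bbExpr year (F k) (F (k + 1)) (F (k + 2)) ((-1) ^ (k + 1)) with hbbdef
  set aa := aExpr year (F k) (F (k + 1)) (F (k + 2)) ((-1) ^ (k + 1)) with haadef
  have hble_of_sol : ∀ a' b', SolK year (k + 1) a' b' → b' ≤ bb := by
    rintro a' b' ⟨ha', hb', he'⟩
    have he2 : F (k + 1) * a' + F (k + 2) * b' = year := he'
    have hnn : 0 ≤ F (k + 1) * a' := mul_nonneg (by linarith) ha'
    exact h3 b' ⟨a', by linear_combination -he2⟩ (by linarith)
  by_cases hbb1 : 1 ≤ bb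
  case neg =>
    rw [if_neg hbb1]
    have hno : ∀ a' b', ¬ SolK year (k + 1) a' b' := by
      intro a' b' hs
      have hle := hble_of_sol a' b' hs
      have hb1 := hs.2.1
      omega
    cases best with
    | none =>
        simp only [BInv] at hinv ⊢
        intro j a b hj hjlt
        by_cases hjk : j < k + 1
        · exact hinv j a b hj hjk
        · have hje : j = k + 1 := by omega
          subst hje
          exact hno a b
    | some pr =>
        obtain ⟨s₀, a₀⟩ := pr
        simp only [BInv] at hinv ⊢
        obtain ⟨⟨ha0, hb0, j, hj1, hjb, hje⟩, hmin⟩ := hinv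
        refine ⟨⟨ha0, hb0, j, hj1, by omega, hje⟩, ?_⟩
        intro j' a b hj' hjlt hsol
        by_cases hjk : j' < k + 1
        · exact hmin j' a b hj' hjk hsol
        · have hje' : j' = k + 1 := by omega
          subst hje'
          exact absurd hsol (hno a b)
  case pos =>
    rw [if_pos hbb1]
    have haa : aa = (year - F (k + 2) * bb) / F (k + 1) := by
      rw [haadef, aExpr, PySem.Int.floordiv_eq_ediv_of_pos (by omega : (0:Int) < F (k + 1))]
    have haamul : (year - F (k + 2) * bb) / F (k + 1) * F (k + 1) = year - F (k + 2) * bb :=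
      Int.ediv_mul_cancel h1
    have he_cand : F (k + 1) * aa + F (k + 2) * bb = year := by
      rw [haa]; linear_combination haamul
    have ha_cand : 0 ≤ aa := by
      rw [haa]; exact Int.ediv_nonneg (by linarith) (by omega)
    have hsol_cand : SolK year (k + 1) aa bb := ⟨ha_cand, hbb1, he_cand⟩
    have hcand_min : ∀ a' b', SolK year (k + 1) a' b' →
        aa + bb < a' + b' ∨ (aa + bb = a' + b' ∧ aa ≤ a') := by
      intro a' b' hs
      have hb' := hble_of_sol a' b' hs
      have he2 : F (k + 1) * a' + F (k + 2) * b' = year := hs.2.2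
      exact cand_min year (F (k + 1)) (F (k + 2)) hp hpf he_cand he2 hb'
    have he_pack : F (k + 1) * aa + F (k + 1 + 1) * (aa + bb - aa) = year := by
      show F (k + 1) * aa + F (k + 2) * (aa + bb - aa) = year
      linear_combination he_cand
    cases best with
    | none =>
        simp only [BInv] at hinv ⊢
        refine ⟨⟨ha_cand, by omega, k + 1, by omega, by omega, he_pack⟩, ?_⟩
        intro j a b hj hjlt hsol
        by_cases hjk : j < k + 1
        · exact absurd hsol (hinv j a b hj hjk)
        · have hje : j = k + 1 := by omega
          subst hje
          exact hcand_min a b hsol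
    | some pr =>
        obtain ⟨s₀, a₀⟩ := pr
        show BInv year (k + 2)
          (if pairLt (aa + bb, aa) (s₀, a₀) = true then some (aa + bb, aa) else some (s₀, a₀))
        by_cases hpl : pairLt (aa + bb, aa) (s₀, a₀) = true
        · rw [if_pos hpl]
          simp only [pairLt, Bool.or_eq_true, Bool.and_eq_true, decide_eq_true_eq,
            beq_iff_eq] at hpl
          simp only [BInv] at hinv ⊢
          obtain ⟨⟨ha0, hb0, j, hj1, hjb, hje⟩, hmin⟩ := hinv
          refine ⟨⟨ha_cand, by omega, k + 1, by omega, by omega, he_pack⟩, ?_⟩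
          intro j' a b hj' hjlt hsol
          by_cases hjk : j' < k + 1
          · have := hmin j' a b hj' hjk hsol
            omega
          · have hje' : j' = k + 1 := by omega
            subst hje'
            exact hcand_min a b hsol
        · rw [if_neg hpl]
          simp only [pairLt, Bool.or_eq_true, Bool.and_eq_true, decide_eq_true_eq,
            beq_iff_eq] at hpl
          push_neg at hpl
          simp only [BInv] at hinv ⊢
          obtain ⟨⟨ha0, hb0, j, hj1, hjb, hje⟩, hmin⟩ := hinv
          refine ⟨⟨ha0, hb0, j, hj1, by omega, hje⟩, ?_⟩
          intro j' a b hj' hjlt hsol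
          by_cases hjk : j' < k + 1
          · exact hmin j' a b hj' hjk hsol
          · have hje' : j' = k + 1 := by omega
            subst hje'
            have := hcand_min a b hsol
            omega

theorem bLoop_spec (year : Int) (hy : 1 ≤ year) : ∀ (fuel k : Nat) (best : Option (Int × Int)),
    BInv year (k + 1) best → year.toNat + 1 ≤ k + fuel →
    BGInv year (bLoop year fuel (F k) (F (k + 1)) (F (k + 2)) ((-1) ^ (k + 1)) best) := by
  intro fuel
  induction fuel with
  | zero =>
      intro k best hinv hfl
      simp only [bLoop]
      apply Inv_to_GInv year k best hinv
      have h1 := le_F k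
      have h2 : (year.toNat : Int) = year := Int.toNat_of_nonneg (by omega)
      have h3 : (year.toNat : Int) + 1 ≤ (k : Int) := by exact_mod_cast hfl
      linarith
  | succ f ih =>
      intro k best hinv hfl
      simp only [bLoop]
      by_cases hfy : F (k + 2) ≤ year
      · rw [if_pos hfy]
        have hstep := bStep_inv year k best hy hfy hinv
        have e1 : F (k + 1) + F (k + 2) = F (k + 3) := (F_add_two (k + 1)).symm
        have e2 : -((-1:Int) ^ (k + 1)) = (-1) ^ (k + 2) := by
          rw [pow_succ]; ring
        rw [e1, e2]
        exact ih (k + 1) _ hstep (by omega)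
      · rw [if_neg hfy]
        exact Inv_to_GInv year k best hinv (not_le.mp hfy)

-- ===== VERDICT (by name: the statement is the Claim_ definition above) =====
theorem findBeginningPair_spec : Claim_equal_findBeginningPair := by
  unfold Claim_equal_findBeginningPair
  intro year _ hpre
  have hy : 1 ≤ year := hpre
  show findBeginningPair year = findBeginningPair_alt year
  have hG := bLoop_spec year hy (year.toNat + 2) 0 none
    (by simp only [BInv]; intro j a b hj hlt; omega) (by omega)
  have e0 : F 0 = 0 := by simp [F]
  have e3 : ((-1:Int) ^ (0 + 1)) = -1 := by ring
  rw [e0, F_one, F_two, e3] at hG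
  unfold findBeginningPair_alt
  cases hres : bLoop year (year.toNat + 2) 0 1 1 (-1) none with
  | none =>
      exfalso
      rw [hres] at hG
      simp only [BGInv] at hG
      exact hG 1 0 year le_rfl ⟨le_rfl, hy, by rw [F_one, F_two]; ring⟩
  | some pr =>
      obtain ⟨s₀, a₀⟩ := pr
      rw [hres] at hG
      simp only [BGInv] at hG
      obtain ⟨⟨ha0, hb0, hex⟩, hmin⟩ := hG
      have hsolpack : 0 ≤ a₀ ∧ 1 ≤ s₀ - a₀ ∧ ∃ j, 1 ≤ j ∧ SolK year j a₀ (s₀ - a₀) :=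
        ⟨ha0, hb0, by obtain ⟨j, hj1, hje⟩ := hex; exact ⟨j, hj1, ha0, hb0, hje⟩⟩
      have hs0y : s₀ ≤ year := by
        have := hmin 1 0 year le_rfl ⟨le_rfl, hy, by rw [F_one, F_two]; ring⟩
        omega
      have hrun := outerLoop_min year s₀ a₀ hy hsolpack hmin year.toNat 1
        le_rfl (by omega) (by omega)
      unfold findBeginningPair
      rw [hrun]
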